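-- pv_equiv track=rewrite | github.com/MaoucheMounir/Projet-MOGPL | Graphe.py | maxDegPos
-- ===== SOURCE A (Python) =====
-- def getDegres (G): #retourne un tableau de tuple tel que chaque sommet et associé à son degré_pos= nombre d'arcs sortants degré_neg= nombre d'arcs entrants
--   degres = []
--
--   for sommet in G[1]: #parcourir tous les sommets de G
--     degre_pos=0
--     degre_neg=0
--     for arete in G[3]: #compter le nombre de fois ou chaque sommet apparait en tant qu'extrémité d'une arete
--       if sommet in arete :
--         if sommet == arete[0]:
--           degre_pos +=1
--         if sommet == arete[1]:
--           degre_neg +=1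
--
--     degres.append((sommet, degre_pos, degre_neg)) #créer un tuple pour représenté le degré de chaque sommet de G
--
--   return degres
--
-- def maxDegPos(G, list_sommets_testes=[]):
--   degres = getDegres (G)
--   dmax = 0
--   smax = None
--
--   for d in degres:
--     diff_d = d[1]
--     if diff_d > dmax and  d[0] not in list_sommets_testes :
--       dmax = diff_d
--       smax = d[0]
--
--   return smax
-- ===== SOURCE B (Python) =====
-- def maxDegPos(G, list_sommets_testes=[]):
--   outdeg = {}
--   for arete in G[3]:
--     u = arete[0]
--     outdeg[u] = outdeg.get(u, 0) + 1
--   tested = set(list_sommets_testes)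
--   dmax = 0
--   smax = None
--   for s in G[1]:
--     d = outdeg.get(s, 0)
--     if d > dmax and s not in tested:
--       dmax = d
--       smax = s
--   return smax
-- ===== Notes on version B (the rewrite author's own statement) =====
-- stated objective: faster
-- what changed: Replaced the per-vertex rescan of the whole edge list (getDegres) by a single pass over the edges accumulating out-degrees in a dict, a set for the tested vertices, and one scan over G[1].
import Mathlib
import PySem

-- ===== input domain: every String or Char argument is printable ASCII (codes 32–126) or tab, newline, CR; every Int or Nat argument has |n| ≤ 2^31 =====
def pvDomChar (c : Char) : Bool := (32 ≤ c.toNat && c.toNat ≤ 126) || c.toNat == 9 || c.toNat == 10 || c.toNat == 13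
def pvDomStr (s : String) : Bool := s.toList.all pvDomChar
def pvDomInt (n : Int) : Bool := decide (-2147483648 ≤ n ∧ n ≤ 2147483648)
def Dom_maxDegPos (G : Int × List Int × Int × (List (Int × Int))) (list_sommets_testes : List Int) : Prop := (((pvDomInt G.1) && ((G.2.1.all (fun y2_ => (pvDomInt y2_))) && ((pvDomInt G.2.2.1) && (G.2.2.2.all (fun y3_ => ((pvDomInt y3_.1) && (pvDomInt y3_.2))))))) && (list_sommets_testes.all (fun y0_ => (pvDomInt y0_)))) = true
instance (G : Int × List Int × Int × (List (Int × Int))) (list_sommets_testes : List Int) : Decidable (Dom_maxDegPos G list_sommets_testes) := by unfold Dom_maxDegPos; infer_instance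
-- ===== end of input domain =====

-- B replaces A's per-vertex rescan of the edge list by one edge pass into an out-degree dict,
-- a tested-set, and one scan over G[1] (objective: faster, O(V+E) vs O(V*E)); return values proved equal.

-- ===== PORT A =====
def getDegres (G : Int × List Int × Int × (List (Int × Int))) : List (Int × Int × Int) :=
  G.2.1.foldl (fun degres sommet =>
    let dd := G.2.2.2.foldl (fun (p : Int × Int) arete =>
      if sommet = arete.1 ∨ sommet = arete.2 then
        let p1 := if sommet = arete.1 then (p.1 + 1, p.2) else p
        if sommet = arete.2 then (p1.1, p1.2 + 1) else p1
      else p) (0, 0)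
    degres ++ [(sommet, dd.1, dd.2)]) []

def maxDegPos (G : Int × List Int × Int × (List (Int × Int))) (list_sommets_testes : List Int) : Option Int :=
  let degres := getDegres G
  (degres.foldl (fun (st : Int × Option Int) d =>
    if d.2.1 > st.1 ∧ d.1 ∉ list_sommets_testes then (d.2.1, some d.1) else st) (0, none)).2

-- ===== PORT B =====
def maxDegPos_alt (G : Int × List Int × Int × (List (Int × Int))) (list_sommets_testes : List Int) : Option Int :=
  let outdeg : PySem.Dict Int Int :=
    G.2.2.2.foldl (fun d arete => d.insert arete.1 (d.getD arete.1 0 + 1)) PySem.Dict.empty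
  let tested : PySem.Set Int := PySem.Set.ofList list_sommets_testes
  (G.2.1.foldl (fun (st : Int × Option Int) s =>
    let dv := outdeg.getD s 0
    if dv > st.1 ∧ ¬ PySem.Set.contains tested s then (dv, some s) else st) (0, none)).2

-- ===== PRECONDITION & SPEC =====
def Spec_maxDegPos (G : Int × List Int × Int × (List (Int × Int))) (list_sommets_testes : List Int) (out : Option Int) : Prop := out = maxDegPos_alt G list_sommets_testes
instance (G : Int × List Int × Int × (List (Int × Int))) (list_sommets_testes : List Int) (out : Option Int) : Decidable (Spec_maxDegPos G list_sommets_testes out) := by unfold Spec_maxDegPos; infer_instance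

-- ===== CLAIM (what is proved, stated in full; the proofs are below) =====
def Claim_equal_maxDegPos : Prop := ∀ (G : Int × List Int × Int × (List (Int × Int))) (list_sommets_testes : List Int), Dom_maxDegPos G list_sommets_testes → Spec_maxDegPos G list_sommets_testes (maxDegPos G list_sommets_testes)

-- ===== LEMMAS AND PROOFS =====

-- A's inner edge scan computes the two match counts of v against edge endpoints.
theorem inner_fold (v : Int) (edges : List (Int × Int)) (p : Int × Int) :
    edges.foldl (fun (p : Int × Int) arete =>
      if v = arete.1 ∨ v = arete.2 then
        let p1 := if v = arete.1 then (p.1 + 1, p.2) else p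
        if v = arete.2 then (p1.1, p1.2 + 1) else p1
      else p) p
    = (p.1 + (edges.countP (fun e => e.1 == v) : Int),
       p.2 + (edges.countP (fun e => e.2 == v) : Int)) := by
  induction edges generalizing p with
  | nil => simp
  | cons e es ih =>
    simp only [List.foldl_cons, List.countP_cons]
    rw [ih]
    by_cases h1 : v = e.1 <;> by_cases h2 : v = e.2
    · rw [if_pos (Or.inl h1), if_pos h2, if_pos h1]
      simp [Prod.ext_iff, h1]; omega
    · have h2' : e.2 ≠ e.1 := fun h => h2 (h1.symm ▸ h.symm ▸ rfl)
      rw [if_pos (Or.inl h1), if_neg h2, if_pos h1]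
      simp [Prod.ext_iff, h1, h2']; omega
    · have h1' : e.1 ≠ e.2 := fun h => h1 (h2.symm ▸ h ▸ rfl)
      rw [if_pos (Or.inr h2), if_pos h2, if_neg h1]
      simp [Prod.ext_iff, h2, h1']; omega
    · have ha : e.1 ≠ v := fun h => h1 h.symm
      have hb : e.2 ≠ v := fun h => h2 h.symm
      rw [if_neg (by simp [h1, h2])]
      simp [ha, hb]

-- B's dict of out-degrees looks up to the same count A computes.
theorem dict_getD (edges : List (Int × Int)) (v : Int) :
    (edges.foldl (fun (d : PySem.Dict Int Int) arete =>
        d.insert arete.1 (d.getD arete.1 0 + 1)) PySem.Dict.empty).getD v 0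
    = (edges.countP (fun e => e.1 == v) : Int) := by
  have h := PySem.Dict.getD_foldl_insert_add_one (edges.map Prod.fst) PySem.Dict.empty v
  rw [List.foldl_map] at h
  rw [h, PySem.Dict.getD_empty, List.count_eq_countP, List.countP_map]
  simp [Function.comp_def, BEq.comm]

theorem main_eq (G : Int × List Int × Int × (List (Int × Int))) (lst : List Int) :
    maxDegPos G lst = maxDegPos_alt G lst := by
  unfold maxDegPos maxDegPos_alt getDegres
  simp only [inner_fold, dict_getD, PySem.List.foldl_append_singleton_eq_map,
    List.nil_append, List.foldl_map, zero_add]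
  congr 1
  apply List.foldl_ext
  intro st s hs
  by_cases hc : s ∈ lst <;> simp [hc, PySem.Set.mem_ofList]

-- ===== VERDICT (by name: the statement is the Claim_ definition above) =====
theorem maxDegPos_spec : Claim_equal_maxDegPos := by
  intro G lst _
  show maxDegPos G lst = maxDegPos_alt G lst
  exact main_eq G lst
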